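-- pv_equiv track=rewrite | github.com/ThomasBench/SimilarityChecker | helpers.py | glue_sequence
-- ===== SOURCE A (Python) =====
-- from typing import List, Tuple, Dict, Set, Callable
--
-- N_gram = Tuple[str]
--
-- def glue_sequence(sequence: List[Tuple[N_gram,int,int]], gap_tolerance:int) -> List[Tuple[Tuple[int,int],Tuple[int,int]]]:
--     """
--     Glue together a sequence of n_grams with a certain tolerance between two non matching n_grams
--     """
--     final = []
--     temp = [sequence[0][1:]]
--     last_seen = sequence[0][1:]
--     for _, ind_1, ind_2 in sequence[1:]:
--         if 0<= ind_1 - last_seen[0] < gap_tolerance and 0<= ind_2 - last_seen[1] < gap_tolerance :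
--             temp.append((ind_1,ind_2))
--         else:
--             final.append((temp[0], temp[-1]))
--             temp.clear()
--             temp.append((ind_1,ind_2))
--         last_seen = (ind_1,ind_2)
--     final.append((temp[0], temp[-1]))
--     return final
-- ===== SOURCE B (Python) =====
-- def glue_sequence(sequence, gap_tolerance):
--     points = [(i1, i2) for _, i1, i2 in sequence]
--     n = len(points)
--     breaks = [0]
--     for i in range(1, n):
--         a, b = points[i - 1], points[i]
--         if not (0 <= b[0] - a[0] < gap_tolerance and 0 <= b[1] - a[1] < gap_tolerance):
--             breaks.append(i)
--     breaks.append(n)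
--     return [(points[breaks[j]], points[breaks[j + 1] - 1]) for j in range(len(breaks) - 1)]
-- ===== Notes on version B (the rewrite author's own statement) =====
-- stated objective: alternative
-- what changed: Replaces A's single accumulator loop (a temp list cleared at every gap) by a two-pass scheme: a first pass builds an explicit boundary-index table of group starts, and a second comprehension reads each group's two endpoints back by index.
import Mathlib
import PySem

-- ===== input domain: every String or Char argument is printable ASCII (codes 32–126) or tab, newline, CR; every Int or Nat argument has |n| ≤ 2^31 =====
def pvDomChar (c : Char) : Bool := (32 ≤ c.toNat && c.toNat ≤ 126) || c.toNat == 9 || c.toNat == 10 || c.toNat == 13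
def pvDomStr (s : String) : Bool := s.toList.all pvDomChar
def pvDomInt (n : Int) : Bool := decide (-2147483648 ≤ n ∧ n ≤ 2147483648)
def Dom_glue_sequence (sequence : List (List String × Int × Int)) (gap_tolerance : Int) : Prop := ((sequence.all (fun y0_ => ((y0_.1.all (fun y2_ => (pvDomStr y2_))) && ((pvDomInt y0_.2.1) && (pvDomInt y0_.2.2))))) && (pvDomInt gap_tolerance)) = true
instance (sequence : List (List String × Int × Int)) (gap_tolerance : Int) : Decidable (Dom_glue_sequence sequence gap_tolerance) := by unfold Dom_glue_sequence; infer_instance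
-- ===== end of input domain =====

-- B replaces A's accumulator loop (a temp list cleared at each gap) by a two-pass scheme: first a
-- boundary-index table of group starts, then a comprehension reading each group's endpoints by index;
-- objective: alternative (same O(n) cost, different decomposition).

-- ===== PORT A =====
-- shared helper: the adjacency test '0 <= ind_1 - last[0] < gap_tolerance and
-- 0 <= ind_2 - last[1] < gap_tolerance', inlined identically in both Python sources
def pvAdj (gap : Int) (a b : Int × Int) : Bool :=
  (decide (0 ≤ b.1 - a.1) && decide (b.1 - a.1 < gap)) &&
  (decide (0 ≤ b.2 - a.2) && decide (b.2 - a.2 < gap))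

-- A-side helper: the body of A's for-loop over the state (final, temp, last_seen)
def glueStep (gap : Int)
    (st : List ((Int × Int) × (Int × Int)) × List (Int × Int) × (Int × Int))
    (t : List String × Int × Int) :
    List ((Int × Int) × (Int × Int)) × List (Int × Int) × (Int × Int) :=
  if pvAdj gap st.2.2 (t.2.1, t.2.2) then
    (st.1, st.2.1 ++ [(t.2.1, t.2.2)], (t.2.1, t.2.2))
  else
    (st.1 ++ [(PySem.List.pyGetD st.2.1 0 (0, 0), PySem.List.pyGetD st.2.1 (-1) (0, 0))],
     [(t.2.1, t.2.2)], (t.2.1, t.2.2))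

def glue_sequence (sequence : List (List String × Int × Int)) (gap_tolerance : Int) :
    List ((Int × Int) × (Int × Int)) :=
  match sequence with
  | [] => []  -- Python raises IndexError at sequence[0]; excluded by Pre_
  | s0 :: _ =>
    -- temp = [sequence[0][1:]]; last_seen = sequence[0][1:]; loop over sequence[1:]
    let r := (PySem.List.slice sequence (some 1) none).foldl
      (glueStep gap_tolerance) ([], [s0.2], s0.2)
    -- final.append((temp[0], temp[-1]))
    r.1 ++ [(PySem.List.pyGetD r.2.1 0 (0, 0), PySem.List.pyGetD r.2.1 (-1) (0, 0))]

-- ===== PORT B =====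
def glue_sequence_alt (sequence : List (List String × Int × Int)) (gap_tolerance : Int) :
    List ((Int × Int) × (Int × Int)) :=
  let points := sequence.map (fun t => (t.2.1, t.2.2))
  let n : Int := (points.length : Int)
  let breaks := (PySem.List.pyRange 1 n).foldl
    (fun br i =>
      if !(pvAdj gap_tolerance (PySem.List.pyGetD points (i - 1) (0, 0))
                               (PySem.List.pyGetD points i (0, 0)))
      then br ++ [i] else br) [0]
  let breaks2 := breaks ++ [n]
  (PySem.List.pyRange 0 ((breaks2.length : Int) - 1)).map
    (fun j => (PySem.List.pyGetD points (PySem.List.pyGetD breaks2 j 0) (0, 0),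
               PySem.List.pyGetD points (PySem.List.pyGetD breaks2 (j + 1) 0 - 1) (0, 0)))

-- ===== PRECONDITION & SPEC =====
-- Pre_ excludes only the empty sequence, on which Python A (and Python B) raise IndexError.
def Pre_glue_sequence (sequence : List (List String × Int × Int)) (gap_tolerance : Int) : Prop :=
  sequence ≠ []
instance (sequence : List (List String × Int × Int)) (gap_tolerance : Int) : Decidable (Pre_glue_sequence sequence gap_tolerance) := by unfold Pre_glue_sequence; infer_instance

def pvWitness_glue_sequence : (List (List String × Int × Int)) × Int := ([(["a"], 0, 1)], 2)

def Spec_glue_sequence (sequence : List (List String × Int × Int)) (gap_tolerance : Int) (out : List ((Int × Int) × (Int × Int))) : Prop := out = glue_sequence_alt sequence gap_tolerance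
instance (sequence : List (List String × Int × Int)) (gap_tolerance : Int) (out : List ((Int × Int) × (Int × Int))) : Decidable (Spec_glue_sequence sequence gap_tolerance out) := by unfold Spec_glue_sequence; infer_instance

-- ===== CLAIM (what is proved, stated in full; the proofs are below) =====
def Claim_equal_glue_sequence : Prop := ∀ (sequence : List (List String × Int × Int)) (gap_tolerance : Int), Dom_glue_sequence sequence gap_tolerance → Pre_glue_sequence sequence gap_tolerance → Spec_glue_sequence sequence gap_tolerance (glue_sequence sequence gap_tolerance)

-- ===== LEMMAS AND PROOFS =====

-- reference recursion: endpoints of the maximal adjacent runs, carrying (first, last) of the open run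
def pvGroups (gap : Int) (first last : Int × Int) :
    List (Int × Int) → List ((Int × Int) × (Int × Int))
  | [] => [(first, last)]
  | h :: t =>
    if pvAdj gap last h then pvGroups gap first h t
    else (first, last) :: pvGroups gap h h t

-- B's second pass, abstracted over the boundary table
def pvBout (points : List (Int × Int)) (breaks2 : List Int) : List ((Int × Int) × (Int × Int)) :=
  (PySem.List.pyRange 0 ((breaks2.length : Int) - 1)).map
    (fun j => (PySem.List.pyGetD points (PySem.List.pyGetD breaks2 j 0) (0, 0),
               PySem.List.pyGetD points (PySem.List.pyGetD breaks2 (j + 1) 0 - 1) (0, 0)))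

-- B's body, abstracted over the points list
def pvBcore (gap : Int) (points : List (Int × Int)) : List ((Int × Int) × (Int × Int)) :=
  pvBout points ((PySem.List.pyRange 1 (points.length : Int)).foldl
    (fun br i =>
      if !(pvAdj gap (PySem.List.pyGetD points (i - 1) (0, 0))
                     (PySem.List.pyGetD points i (0, 0)))
      then br ++ [i] else br) [0] ++ [(points.length : Int)])

-- the interior break indices of a points list
def pvBrks (gap : Int) (points : List (Int × Int)) : List Int :=
  (PySem.List.pyRange 1 (points.length : Int)).filter
    (fun i => !(pvAdj gap (PySem.List.pyGetD points (i - 1) (0, 0))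
                          (PySem.List.pyGetD points i (0, 0))))

-- the pair of endpoints a boundary pair (start, next start) selects
def pvG (points : List (Int × Int)) (ab : Int × Int) : (Int × Int) × (Int × Int) :=
  (PySem.List.pyGetD points ab.1 (0, 0), PySem.List.pyGetD points (ab.2 - 1) (0, 0))

theorem pv_alt_eq_Bcore (sequence : List (List String × Int × Int)) (gap : Int) :
    glue_sequence_alt sequence gap = pvBcore gap (sequence.map (fun t => (t.2.1, t.2.2))) := rfl

-- A's fold, finished by the trailing append, computes pvGroups
theorem pv_foldA (gap : Int) (rest : List (List String × Int × Int))
    (final : List ((Int × Int) × (Int × Int))) (a : Int × Int) (temp : List (Int × Int))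
    (last : Int × Int) (hlast : PySem.List.pyGetD (a :: temp) (-1) (0, 0) = last) :
    (let r := rest.foldl (glueStep gap) (final, a :: temp, last)
     r.1 ++ [(PySem.List.pyGetD r.2.1 0 (0, 0), PySem.List.pyGetD r.2.1 (-1) (0, 0))])
    = final ++ pvGroups gap a last (rest.map (fun t => (t.2.1, t.2.2))) := by
  induction rest generalizing final a temp last with
  | nil =>
    simp only [List.foldl_nil, List.map_nil, pvGroups]
    rw [PySem.List.pyGetD_zero_cons, hlast]
  | cons t rest ih =>
    simp only [List.foldl_cons, List.map_cons]
    by_cases hadj : pvAdj gap last (t.2.1, t.2.2)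
    · have hstep : glueStep gap (final, a :: temp, last) t
        = (final, a :: (temp ++ [(t.2.1, t.2.2)]), (t.2.1, t.2.2)) := by
        simp [glueStep, hadj]
      rw [hstep]
      rw [ih final a (temp ++ [(t.2.1, t.2.2)]) (t.2.1, t.2.2)
        (by rw [show a :: (temp ++ [(t.2.1, t.2.2)]) = (a :: temp) ++ [(t.2.1, t.2.2)] from rfl,
             PySem.List.pyGetD_neg_one_append_singleton])]
      rw [pvGroups, if_pos hadj]
    · have hstep : glueStep gap (final, a :: temp, last) t
        = (final ++ [(a, last)], [(t.2.1, t.2.2)], (t.2.1, t.2.2)) := by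
        simp only [glueStep, hadj, if_neg, Bool.false_eq_true, not_false_iff]
        rw [PySem.List.pyGetD_zero_cons, hlast]
      rw [hstep]
      rw [ih (final ++ [(a, last)]) (t.2.1, t.2.2) [] (t.2.1, t.2.2) (by
        rw [PySem.List.pyGetD_neg_one _ _ (by simp)]; simp)]
      rw [pvGroups, if_neg hadj]
      simp

-- index shift under cons, for nonnegative indices
theorem pv_pyGetD_cons_shift {α : Type} (x : α) (l : List α) (i : Int) (d : α) (h : 0 ≤ i) :
    PySem.List.pyGetD (x :: l) (i + 1) d = PySem.List.pyGetD l i d := by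
  obtain ⟨k, rfl⟩ := Int.eq_ofNat_of_zero_le h
  have : (k : Int) + 1 = ((k + 1 : Nat) : Int) := by push_cast; ring
  rw [this, PySem.List.pyGetD_natCast, PySem.List.pyGetD_natCast]
  simp

theorem pv_pyRange_shift (a b : Int) :
    PySem.List.pyRange (a + 1) (b + 1) = (PySem.List.pyRange a b).map (· + 1) := by
  rw [PySem.List.pyRange_one, PySem.List.pyRange_one]
  have : (b + 1 - (a + 1)) = b - a := by ring
  rw [this, List.map_map]
  exact List.map_congr_left (fun k _ => by simp; ring)

-- prepending a point shifts the break table (and possibly opens a break at index 1)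
theorem pv_brks_cons (gap : Int) (x h : Int × Int) (t : List (Int × Int)) :
    pvBrks gap (x :: h :: t)
    = (if !(pvAdj gap x h) then [1] else []) ++ (pvBrks gap (h :: t)).map (· + 1) := by
  unfold pvBrks
  have hlen : ((x :: h :: t).length : Int) = ((h :: t).length : Int) + 1 := by
    push_cast [List.length_cons]; ring
  have hpos : (1 : Int) < ((x :: h :: t).length : Int) := by
    rw [hlen]; simp only [List.length_cons]; push_cast; omega
  rw [PySem.List.pyRange_one_cons hpos, List.filter_cons]
  have hshift : PySem.List.pyRange (1 + 1) ((x :: h :: t).length : Int)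
      = (PySem.List.pyRange 1 ((h :: t).length : Int)).map (· + 1) := by
    rw [hlen, pv_pyRange_shift]
  rw [hshift, List.filter_map]
  have hpred1 : (!(pvAdj gap (PySem.List.pyGetD (x :: h :: t) (1 - 1) (0, 0))
        (PySem.List.pyGetD (x :: h :: t) 1 (0, 0)))) = !(pvAdj gap x h) := by
    norm_num
    rw [show (1 : Int) = 0 + 1 from rfl,
        pv_pyGetD_cons_shift x (h :: t) 0 (0, 0) le_rfl, PySem.List.pyGetD_zero_cons]
  have hcong : List.filter ((fun i => !(pvAdj gap (PySem.List.pyGetD (x :: h :: t) (i - 1) (0, 0))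
        (PySem.List.pyGetD (x :: h :: t) i (0, 0)))) ∘ (· + 1))
        (PySem.List.pyRange 1 ((h :: t).length : Int))
      = List.filter (fun i => !(pvAdj gap (PySem.List.pyGetD (h :: t) (i - 1) (0, 0))
        (PySem.List.pyGetD (h :: t) i (0, 0))))
        (PySem.List.pyRange 1 ((h :: t).length : Int)) := by
    apply List.filter_congr
    intro i hi
    have h1 : 1 ≤ i := (PySem.List.mem_pyRange_one.mp hi).1
    simp only [Function.comp]
    rw [show i + 1 - 1 = (i - 1) + 1 by ring,
        pv_pyGetD_cons_shift x (h :: t) (i - 1) (0, 0) (by omega),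
        pv_pyGetD_cons_shift x (h :: t) i (0, 0) (by omega)]
  rw [hcong, hpred1]
  by_cases hxh : pvAdj gap x h <;> simp [hxh]

theorem pv_brks_bounds (gap : Int) (pts : List (Int × Int)) (m : Int) (hm : m ∈ pvBrks gap pts) :
    1 ≤ m ∧ m < (pts.length : Int) := by
  unfold pvBrks at hm
  exact PySem.List.mem_pyRange_one.mp (List.mem_of_mem_filter hm)

-- the 'range over indices of adjacent pairs' comprehension is a map over zipped pairs
theorem pv_zipPairs {α : Type} (g : Int → Int → α) (bs : List Int) :
    (PySem.List.pyRange 0 ((bs.length : Int) - 1)).map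
      (fun j => g (PySem.List.pyGetD bs j 0) (PySem.List.pyGetD bs (j + 1) 0))
    = (bs.zip bs.tail).map (fun ab => g ab.1 ab.2) := by
  induction bs with
  | nil => simp [PySem.List.pyRange_one_eq_nil]
  | cons a bs ih =>
    match bs with
    | [] => simp [PySem.List.pyRange_one_eq_nil]
    | b :: t =>
      have hlen : ((a :: b :: t).length : Int) - 1 = ((b :: t).length : Int) := by
        push_cast [List.length_cons]; ring
      rw [hlen]
      have hpos : (0 : Int) < ((b :: t).length : Int) := by
        simp only [List.length_cons]; positivity
      rw [PySem.List.pyRange_one_cons hpos, List.map_cons]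
      have hshift : PySem.List.pyRange (0 + 1) ((b :: t).length : Int)
          = (PySem.List.pyRange 0 (((b :: t).length : Int) - 1)).map (· + 1) := by
        have : ((b :: t).length : Int) = (((b :: t).length : Int) - 1) + 1 := by ring
        rw [this, ← pv_pyRange_shift]
        norm_num
      rw [zero_add] at hshift ⊢
      rw [hshift, List.map_map]
      have heads : PySem.List.pyGetD (a :: b :: t) 1 0 = b := by
        rw [show (1 : Int) = 0 + 1 from rfl,
            pv_pyGetD_cons_shift a (b :: t) 0 0 le_rfl, PySem.List.pyGetD_zero_cons]
      have tails : ∀ j ∈ PySem.List.pyRange 0 (((b :: t).length : Int) - 1),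
          ((fun j => g (PySem.List.pyGetD (a :: b :: t) j 0) (PySem.List.pyGetD (a :: b :: t) (j + 1) 0)) ∘ (· + 1)) j
          = g (PySem.List.pyGetD (b :: t) j 0) (PySem.List.pyGetD (b :: t) (j + 1) 0) := by
        intro j hj
        have h0 : 0 ≤ j := (PySem.List.mem_pyRange_one.mp hj).1
        simp only [Function.comp]
        rw [pv_pyGetD_cons_shift a (b :: t) j 0 h0,
            show j + 1 + 1 = (j + 1) + 1 from rfl,
            pv_pyGetD_cons_shift a (b :: t) (j + 1) 0 (by omega)]
      rw [List.map_congr_left tails, ih]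
      simp [heads, PySem.List.pyGetD_zero_cons]

-- pvGroups of the open run: only the first component of the head depends on 'first'
theorem pv_groups_head (gap : Int) (last : Int × Int) (t : List (Int × Int)) :
    ∃ e o, ∀ f, pvGroups gap f last t = (f, e) :: o := by
  induction t generalizing last with
  | nil => exact ⟨last, [], fun f => rfl⟩
  | cons h t ih =>
    by_cases hadj : pvAdj gap last h
    · obtain ⟨e, o, he⟩ := ih h
      exact ⟨e, o, fun f => by rw [pvGroups, if_pos hadj]; exact he f⟩
    · exact ⟨last, pvGroups gap h h t, fun f => by rw [pvGroups, if_neg hadj]⟩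

-- B's body in boundary-pair form
theorem pv_Bcore_zip (gap : Int) (pts : List (Int × Int)) :
    pvBcore gap pts
    = (((0 : Int) :: (pvBrks gap pts ++ [(pts.length : Int)])).zip
        (pvBrks gap pts ++ [(pts.length : Int)])).map (pvG pts) := by
  unfold pvBcore
  rw [PySem.List.foldl_append_if
    (fun i => !(pvAdj gap (PySem.List.pyGetD pts (i - 1) (0, 0))
                          (PySem.List.pyGetD pts i (0, 0)))) (fun i => i)
    (PySem.List.pyRange 1 (pts.length : Int)) [0]]
  rw [List.map_id_fun']
  show pvBout pts (((0 : Int) :: pvBrks gap pts) ++ [(pts.length : Int)]) = _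
  unfold pvBout
  rw [List.cons_append]
  rw [pv_zipPairs (fun a b => (PySem.List.pyGetD pts a (0, 0), PySem.List.pyGetD pts (b - 1) (0, 0)))
      (((0 : Int) :: (pvBrks gap pts ++ [(pts.length : Int)])))]
  rfl

-- main B-side lemma: B's two-pass body computes the reference recursion
theorem pv_Bcore_eq_groups (gap : Int) (xs : List (Int × Int)) (x : Int × Int) :
    pvBcore gap (x :: xs) = pvGroups gap x x xs := by
  induction xs generalizing x with
  | nil =>
    rw [pv_Bcore_zip]
    have hb : pvBrks gap [x] = [] := by
      unfold pvBrks
      rw [PySem.List.pyRange_one_eq_nil (by simp)]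
      rfl
    rw [hb]
    simp only [List.nil_append, List.length_cons, List.length_nil,
      List.zip_cons_cons, List.zip_nil_right, List.map_cons, List.map_nil]
    show [pvG [x] (0, 1)] = [(x, x)]
    simp [pvG, PySem.List.pyGetD_zero_cons]
  | cons h t ih =>
    have hn1 : (1 : Int) ≤ ((h :: t).length : Int) := by
      simp only [List.length_cons]; push_cast; omega
    have hYmem : ∀ m ∈ pvBrks gap (h :: t) ++ [((h :: t).length : Int)], 1 ≤ m := by
      intro m hm
      rcases List.mem_append.mp hm with hm | hm
      · exact (pv_brks_bounds gap (h :: t) m hm).1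
      · rw [List.mem_singleton.mp hm]; exact hn1
    have hn' : (((x :: h :: t).length : Int)) = ((h :: t).length : Int) + 1 := by
      push_cast [List.length_cons]; ring
    have hY' : pvBrks gap (x :: h :: t) ++ [((x :: h :: t).length : Int)]
        = (if !(pvAdj gap x h) then [1] else [])
          ++ (pvBrks gap (h :: t) ++ [((h :: t).length : Int)]).map (· + 1) := by
      rw [pv_brks_cons, hn', List.map_append, List.append_assoc]
      simp
    have hshiftmap : ∀ (Z : List (Int × Int)), (∀ ab ∈ Z, 0 ≤ ab.1 ∧ 1 ≤ ab.2) →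
        (Z.map (Prod.map (· + 1) (· + 1))).map (pvG (x :: h :: t)) = Z.map (pvG (h :: t)) := by
      intro Z hZ
      rw [List.map_map]
      apply List.map_congr_left
      intro ab hab
      obtain ⟨h1, h2⟩ := hZ ab hab
      simp only [Function.comp, Prod.map, pvG]
      rw [pv_pyGetD_cons_shift x (h :: t) ab.1 (0, 0) h1,
          show ab.2 + 1 - 1 = (ab.2 - 1) + 1 by ring,
          pv_pyGetD_cons_shift x (h :: t) (ab.2 - 1) (0, 0) (by omega)]
    by_cases hadj : pvAdj gap x h
    · -- adjacent: the head of the first group extends to the left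
      obtain ⟨y0, Ytl, hYe⟩ := List.exists_cons_of_ne_nil
        (show pvBrks gap (h :: t) ++ [((h :: t).length : Int)] ≠ [] by simp)
      have hy0 : 1 ≤ y0 := hYmem y0 (by rw [hYe]; exact List.mem_cons_self)
      rw [pv_Bcore_zip, hY', hadj]
      simp only [Bool.not_true, Bool.false_eq_true, if_false, List.nil_append]
      rw [hYe, List.map_cons, List.zip_cons_cons, List.map_cons]
      rw [show ((y0 + 1) :: Ytl.map (· + 1)) = ((y0 :: Ytl).map (· + 1)) from rfl]
      rw [List.zip_map, hshiftmap ((y0 :: Ytl).zip Ytl) (by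
        intro ab hab
        obtain ⟨ha, hb⟩ := List.of_mem_zip hab
        constructor
        · have := hYmem ab.1 (by rw [hYe]; exact ha); omega
        · exact hYmem ab.2 (by rw [hYe]; exact List.mem_cons_of_mem _ hb))]
      have hhead : pvG (x :: h :: t) (0, y0 + 1)
          = (x, PySem.List.pyGetD (h :: t) (y0 - 1) (0, 0)) := by
        simp only [pvG, PySem.List.pyGetD_zero_cons]
        rw [show y0 + 1 - 1 = (y0 - 1) + 1 by ring,
            pv_pyGetD_cons_shift x (h :: t) (y0 - 1) (0, 0) (by omega)]
      rw [hhead]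
      -- relate the shared tail through pvBcore (h :: t) = pvGroups h h t
      have hB : pvGroups gap h h t
          = (h, PySem.List.pyGetD (h :: t) (y0 - 1) (0, 0))
            :: ((y0 :: Ytl).zip Ytl).map (pvG (h :: t)) := by
        rw [← ih h, pv_Bcore_zip, hYe, List.zip_cons_cons, List.map_cons]
        congr 1
        simp only [pvG, PySem.List.pyGetD_zero_cons]
      obtain ⟨e, o, hfo⟩ := pv_groups_head gap h t
      have h1 := (hfo h).symm.trans hB
      have he : e = PySem.List.pyGetD (h :: t) (y0 - 1) (0, 0) := by
        have := (List.cons.injEq _ _ _ _).mp h1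
        exact (Prod.mk.injEq _ _ _ _).mp this.1 |>.2
      have ho : o = ((y0 :: Ytl).zip Ytl).map (pvG (h :: t)) := by
        exact ((List.cons.injEq _ _ _ _).mp h1).2
      rw [pvGroups, if_pos hadj, hfo x, he, ho]
    · -- not adjacent: a fresh group (x, x) is emitted in front
      rw [pv_Bcore_zip, hY']
      rw [Bool.not_eq_true] at hadj
      rw [hadj]
      simp only [Bool.not_false, if_true]
      have hL : ((0 : Int) :: (pvBrks gap (h :: t) ++ [((h :: t).length : Int)])).map (· + 1)
          = 1 :: (pvBrks gap (h :: t) ++ [((h :: t).length : Int)]).map (· + 1) := by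
        rw [List.map_cons, zero_add]
      rw [show ([1] ++ (pvBrks gap (h :: t) ++ [((h :: t).length : Int)]).map (· + 1))
          = 1 :: (pvBrks gap (h :: t) ++ [((h :: t).length : Int)]).map (· + 1) from rfl]
      rw [List.zip_cons_cons, List.map_cons]
      rw [← hL, List.zip_map]
      rw [hshiftmap (((0 : Int) :: (pvBrks gap (h :: t) ++ [((h :: t).length : Int)])).zip
          (pvBrks gap (h :: t) ++ [((h :: t).length : Int)])) (by
        intro ab hab
        obtain ⟨ha, hb⟩ := List.of_mem_zip hab
        constructor
        · rcases List.mem_cons.mp ha with h0 | h0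
          · omega
          · have := hYmem ab.1 h0; omega
        · exact hYmem ab.2 hb)]
      rw [← pv_Bcore_zip, ih h]
      have hhead : pvG (x :: h :: t) (0, 1) = (x, x) := by
        simp [pvG, PySem.List.pyGetD_zero_cons]
      rw [hhead, pvGroups, if_neg (by simp [hadj])]

-- ===== VERDICT (by name: the statement is the Claim_ definition above) =====
theorem glue_sequence_spec : Claim_equal_glue_sequence := by
  intro sequence gap _hdom hpre
  unfold Spec_glue_sequence
  match sequence with
  | [] => exact absurd rfl hpre
  | s0 :: rest =>
    rw [pv_alt_eq_Bcore]
    show (let r := (PySem.List.slice (s0 :: rest) (some 1) none).foldl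
            (glueStep gap) ([], [s0.2], s0.2)
          r.1 ++ [(PySem.List.pyGetD r.2.1 0 (0, 0), PySem.List.pyGetD r.2.1 (-1) (0, 0))]) = _
    rw [PySem.List.slice_from_one]
    have := pv_foldA gap rest [] s0.2 [] s0.2 (by rw [PySem.List.pyGetD_neg_one _ _ (by simp)]; simp)
    simp only [List.tail_cons]
    rw [this, List.nil_append, List.map_cons]
    rw [pv_Bcore_eq_groups]
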